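-- pv_equiv track=rewrite | github.com/pypi-data/pypi-mirror-382 | packages/norvelang/norvelang-0.2.1-py3-none-any.whl/norve/interpreter/backend/column_utils.py | _find_simple_key_match
-- ===== SOURCE A (Python) =====
-- from typing import List, Optional
--
-- def _find_simple_key_match(requested: str, row_keys: List[str]) -> Optional[str]:
--     """Find match for simple (non-dotted) keys."""
--     # Exact match
--     matches = [k for k in row_keys if k == requested]
--     if len(matches) == 1:
--         return matches[0]
--
--     # Case-insensitive match
--     matches = [k for k in row_keys if k.lower() == requested.lower()]
--     if len(matches) == 1:
--         return matches[0]
--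
--     # Find keys containing the requested string
--     matches = [k for k in row_keys if requested in k]
--     if len(matches) == 1:
--         return matches[0]
--
--     return None
-- ===== SOURCE B (Python) =====
-- from typing import List, Optional
--
-- def _find_simple_key_match(requested: str, row_keys: List[str]) -> Optional[str]:
--     """Single pass: maintain (count, first) for each of the three match tiers."""
--     req_lower = requested.lower()
--     ec = cc = sc = 0
--     ef = cf = sf = None
--     for k in row_keys:
--         if k == requested:
--             ec += 1
--             if ef is None:
--                 ef = k
--         if k.lower() == req_lower:
--             cc += 1
--             if cf is None:
--                 cf = k
--         if requested in k:
--             sc += 1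
--             if sf is None:
--                 sf = k
--     if ec == 1:
--         return ef
--     if cc == 1:
--         return cf
--     if sc == 1:
--         return sf
--     return None
-- ===== Notes on version B (the rewrite author's own statement) =====
-- stated objective: alternative
-- what changed: Replaces A's three separate filtering passes (one list comprehension per match tier) with a single traversal that maintains a (count, first-match) pair for each tier, then applies the same exact > case-insensitive > substring priority with the count==1 uniqueness rule.
import Mathlib
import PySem

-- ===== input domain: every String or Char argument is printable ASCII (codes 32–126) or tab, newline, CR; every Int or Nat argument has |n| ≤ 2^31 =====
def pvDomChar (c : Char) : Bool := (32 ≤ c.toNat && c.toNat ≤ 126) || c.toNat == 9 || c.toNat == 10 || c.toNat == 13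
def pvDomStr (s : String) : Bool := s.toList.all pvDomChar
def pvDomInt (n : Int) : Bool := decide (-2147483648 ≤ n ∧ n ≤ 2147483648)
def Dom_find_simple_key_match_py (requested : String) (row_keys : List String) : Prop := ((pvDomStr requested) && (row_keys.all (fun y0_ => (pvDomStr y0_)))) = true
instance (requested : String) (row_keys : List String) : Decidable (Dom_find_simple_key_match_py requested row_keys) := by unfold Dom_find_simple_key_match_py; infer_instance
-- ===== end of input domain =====

-- B merges A's three filtering passes into one traversal keeping (count, first) per tier; return value only, no side effects.

-- ===== PORT A =====
def find_simple_key_match_py (requested : String) (row_keys : List String) : Option String :=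
  -- matches = [k for k in row_keys if k == requested]; if len == 1 return matches[0]
  let m1 := row_keys.filter (fun k => k == requested)
  if m1.length == 1 then m1.head?   -- matches[0]; index 0 is in range since length = 1
  else
    let m2 := row_keys.filter (fun k => PySem.Str.lower k == PySem.Str.lower requested)
    if m2.length == 1 then m2.head?
    else
      let m3 := row_keys.filter (fun k => PySem.Str.isIn requested k)
      if m3.length == 1 then m3.head?
      else none

-- ===== PORT B =====
-- one tier's loop-body update: bump the count, remember the first match
def pvBump (hit : Bool) (s : Nat × Option String) (k : String) : Nat × Option String :=
  if hit then (s.1 + 1, if s.2.isNone then some k else s.2) else s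

def find_simple_key_match_py_alt (requested : String) (row_keys : List String) : Option String :=
  let reqLower := PySem.Str.lower requested
  let st := row_keys.foldl
    (fun (st : (Nat × Option String) × (Nat × Option String) × (Nat × Option String)) k =>
      (pvBump (k == requested) st.1 k,
       pvBump (PySem.Str.lower k == reqLower) st.2.1 k,
       pvBump (PySem.Str.isIn requested k) st.2.2 k))
    ((0, none), (0, none), (0, none))
  if st.1.1 == 1 then st.1.2
  else if st.2.1.1 == 1 then st.2.1.2
  else if st.2.2.1 == 1 then st.2.2.2
  else none

-- ===== PRECONDITION & SPEC =====
def Spec_find_simple_key_match_py (requested : String) (row_keys : List String) (out : Option String) : Prop := out = find_simple_key_match_py_alt requested row_keys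
instance (requested : String) (row_keys : List String) (out : Option String) : Decidable (Spec_find_simple_key_match_py requested row_keys out) := by unfold Spec_find_simple_key_match_py; infer_instance

-- ===== CLAIM (what is proved, stated in full; the proofs are below) =====
def Claim_equal_find_simple_key_match_py : Prop := ∀ (requested : String) (row_keys : List String), Dom_find_simple_key_match_py requested row_keys → Spec_find_simple_key_match_py requested row_keys (find_simple_key_match_py requested row_keys)

-- ===== LEMMAS AND PROOFS =====

-- the triple fold splits into three independent single-tier folds
theorem pv_fold_split (p1 p2 p3 : String → Bool) (xs : List String)
    (a b c : Nat × Option String) :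
    xs.foldl (fun (st : (Nat × Option String) × (Nat × Option String) × (Nat × Option String)) k =>
        (pvBump (p1 k) st.1 k, pvBump (p2 k) st.2.1 k, pvBump (p3 k) st.2.2 k)) (a, b, c)
      = (xs.foldl (fun s k => pvBump (p1 k) s k) a,
         xs.foldl (fun s k => pvBump (p2 k) s k) b,
         xs.foldl (fun s k => pvBump (p3 k) s k) c) := by
  induction xs generalizing a b c with
  | nil => rfl
  | cons x xs ih => simp [List.foldl, ih]

-- a single-tier fold computes (count of matches, first match) = (filter length, filter head?)
theorem pv_fold_bump (p : String → Bool) (xs : List String) (c : Nat) (o : Option String) :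
    xs.foldl (fun s k => pvBump (p k) s k) (c, o)
      = (c + (xs.filter p).length, if o.isNone then (xs.filter p).head? else o) := by
  induction xs generalizing c o with
  | nil => simp
  | cons x xs ih =>
    rw [List.foldl_cons]
    by_cases hp : p x
    · rw [show pvBump (p x) (c, o) x = (c + 1, if o.isNone then some x else o) by
        simp [pvBump, hp]]
      rw [ih, List.filter_cons_of_pos hp]
      cases o <;> simp [Nat.add_comm, Nat.add_left_comm]
    · rw [show pvBump (p x) (c, o) x = (c, o) by simp [pvBump, hp]]
      rw [ih, List.filter_cons_of_neg hp]

-- ===== VERDICT (by name: the statement is the Claim_ definition above) =====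
theorem find_simple_key_match_py_spec : Claim_equal_find_simple_key_match_py := by
  intro requested row_keys _
  unfold Spec_find_simple_key_match_py
  simp only [find_simple_key_match_py, find_simple_key_match_py_alt, pv_fold_split,
    pv_fold_bump, Option.isNone_none, if_true, Nat.zero_add]
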